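-- pv_equiv track=rewrite | github.com/vutrung203/BaiVS_code | Python/Bai20_tong_soduonglientip.py | so_luong_so_duong_lien_tiep_co_tong_lon_nhat
-- ===== SOURCE A (Python) =====
-- def so_luong_so_duong_lien_tiep_co_tong_lon_nhat(danh_sach):
--     max_tong = 0
--     tong_hien_tai = 0
--     so_luong_hien_tai = 0
--     max_so_luong = 0
--
--     for num in danh_sach:
--         if num > 0:
--             tong_hien_tai += num
--             so_luong_hien_tai += 1
--             if tong_hien_tai > max_tong:
--                 max_tong = tong_hien_tai
--                 max_so_luong = so_luong_hien_tai
--         else: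
--             tong_hien_tai = 0
--             so_luong_hien_tai = 0
--
--     return max_so_luong
-- ===== SOURCE B (Python) =====
-- def so_luong_so_duong_lien_tiep_co_tong_lon_nhat(danh_sach):
--     # Phase 1: build the maximal runs of consecutive positive numbers.
--     runs = []
--     i, n = 0, len(danh_sach)
--     while i < n:
--         if danh_sach[i] > 0:
--             j = i
--             while j < n and danh_sach[j] > 0:
--                 j += 1
--             runs.append(danh_sach[i:j])
--             i = j
--         else:
--             i += 1
--     # Phase 2: pick the first run with strictly greatest sum; return its length.
--     best_sum = 0
--     best_len = 0
--     for r in runs: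
--         s = sum(r)
--         if s > best_sum:
--             best_sum = s
--             best_len = len(r)
--     return best_len
-- ===== Notes on version B (the rewrite author's own statement) =====
-- stated objective: alternative
-- what changed: Replaces A's single fused scan (running sum/count with in-run max updates) by a two-phase computation: first split the list into maximal runs of consecutive positives, then select the first run with strictly greatest sum and return its length.
import Mathlib
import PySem

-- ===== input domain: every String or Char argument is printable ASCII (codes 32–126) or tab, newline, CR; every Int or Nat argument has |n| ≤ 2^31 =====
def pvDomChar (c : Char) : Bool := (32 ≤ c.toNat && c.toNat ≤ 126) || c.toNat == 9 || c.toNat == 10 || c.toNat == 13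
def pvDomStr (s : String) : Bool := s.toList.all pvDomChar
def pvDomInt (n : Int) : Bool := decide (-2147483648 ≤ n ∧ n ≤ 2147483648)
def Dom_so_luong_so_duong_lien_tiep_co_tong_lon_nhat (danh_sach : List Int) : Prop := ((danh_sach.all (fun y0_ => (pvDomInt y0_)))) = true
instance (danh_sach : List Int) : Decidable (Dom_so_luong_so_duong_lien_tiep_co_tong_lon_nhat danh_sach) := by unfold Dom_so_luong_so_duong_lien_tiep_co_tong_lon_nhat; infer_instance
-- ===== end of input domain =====

-- B replaces A's fused scan by a two-phase computation (split into maximal positive runs, then select the first run of strictly greatest sum); alternative decomposition, same cost.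


-- ===== PORT A =====
-- A's single fused loop over the list, carrying (max_tong, tong_hien_tai, so_luong_hien_tai, max_so_luong).
def pvLoopA : List Int → Int → Int → Int → Int → Int
  | [], _, _, _, max_so_luong => max_so_luong
  | num :: rest, max_tong, tong, so_luong, max_so_luong =>
    if num > 0 then
      let tong' := tong + num
      let so_luong' := so_luong + 1
      if tong' > max_tong then pvLoopA rest tong' tong' so_luong' so_luong'
      else pvLoopA rest max_tong tong' so_luong' max_so_luong
    else pvLoopA rest max_tong 0 0 max_so_luong

def so_luong_so_duong_lien_tiep_co_tong_lon_nhat (danh_sach : List Int) : Int :=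
  pvLoopA danh_sach 0 0 0 0

-- ===== PORT B =====
-- Phase 1 of Source B: scan for the start of a positive run, grab the whole run, skip it, continue.
def pvRunsB : List Int → List (List Int)
  | [] => []
  | x :: xs =>
    if 0 < x then
      (x :: xs.takeWhile (fun a => decide (0 < a))) :: pvRunsB (xs.dropWhile (fun a => decide (0 < a)))
    else pvRunsB xs
  termination_by l => l.length
  decreasing_by
  · have := List.length_dropWhile_le (p := fun a => decide (0 < a)) (l := xs); simp; omega
  · simp

-- Phase 2 of Source B: fold over the runs keeping (best_sum, best_len), strict '>' so the first best run wins.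
def so_luong_so_duong_lien_tiep_co_tong_lon_nhat_alt (danh_sach : List Int) : Int :=
  ((pvRunsB danh_sach).foldl
    (fun acc r => if r.sum > acc.1 then (r.sum, (r.length : Int)) else acc) (0, 0)).2

-- ===== PRECONDITION & SPEC =====
def Spec_so_luong_so_duong_lien_tiep_co_tong_lon_nhat (danh_sach : List Int) (out : Int) : Prop := out = so_luong_so_duong_lien_tiep_co_tong_lon_nhat_alt danh_sach
instance (danh_sach : List Int) (out : Int) : Decidable (Spec_so_luong_so_duong_lien_tiep_co_tong_lon_nhat danh_sach out) := by unfold Spec_so_luong_so_duong_lien_tiep_co_tong_lon_nhat; infer_instance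

-- ===== CLAIM (what is proved, stated in full; the proofs are below) =====
def Claim_equal_so_luong_so_duong_lien_tiep_co_tong_lon_nhat : Prop := ∀ (danh_sach : List Int), Dom_so_luong_so_duong_lien_tiep_co_tong_lon_nhat danh_sach → Spec_so_luong_so_duong_lien_tiep_co_tong_lon_nhat danh_sach (so_luong_so_duong_lien_tiep_co_tong_lon_nhat danh_sach)

-- ===== LEMMAS AND PROOFS =====

-- one-step unfolding of A's loop (the recursive argument stays a variable)
lemma pvLoopA_cons_pos {num : Int} (h : num > 0) (l : List Int) (mt t c mc : Int) :
    pvLoopA (num :: l) mt t c mc =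
      if t + num > mt then pvLoopA l (t + num) (t + num) (c + 1) (c + 1)
      else pvLoopA l mt (t + num) (c + 1) mc := by
  simp only [pvLoopA, if_pos h]

lemma pvLoopA_cons_neg {num : Int} (h : ¬ num > 0) (l : List Int) (mt t c mc : Int) :
    pvLoopA (num :: l) mt t c mc = pvLoopA l mt 0 0 mc := by
  simp only [pvLoopA, if_neg h]

lemma pvLoopA_congr (l : List Int) {a b c d a' b' c' d' : Int}
    (h1 : a = a') (h2 : b = b') (h3 : c = c') (h4 : d = d') :
    pvLoopA l a b c d = pvLoopA l a' b' c' d' := by subst h1 h2 h3 h4; rfl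

-- one-step unfolding of B's run splitter
lemma pvRunsB_cons_pos {x : Int} (h : 0 < x) (xs : List Int) :
    pvRunsB (x :: xs) =
      (x :: xs.takeWhile (fun a => decide (0 < a))) :: pvRunsB (xs.dropWhile (fun a => decide (0 < a))) := by
  rw [pvRunsB]; simp [h]

lemma pvRunsB_cons_neg {x : Int} (h : ¬ 0 < x) (xs : List Int) :
    pvRunsB (x :: xs) = pvRunsB xs := by
  rw [pvRunsB]; simp [h]

-- Crossing one nonempty run of positives from a fresh-run state: the max updates collapse
-- to a single comparison of the run's total against the incoming max.
lemma pvLoopA_run (r : List Int) (hne : r ≠ []) (hpos : ∀ x ∈ r, 0 < x) :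
    ∀ (rest : List Int) (mt t c mc : Int),
      pvLoopA (r ++ rest) mt t c mc =
        pvLoopA rest (max mt (t + r.sum)) (t + r.sum) (c + r.length)
          (if t + r.sum > mt then c + r.length else mc) := by
  induction r with
  | nil => exact absurd rfl hne
  | cons x r' ih =>
    intro rest mt t c mc
    have hx : 0 < x := hpos x (by simp)
    rw [List.cons_append, pvLoopA_cons_pos (by omega : x > 0)]
    cases r' with
    | nil =>
      rw [List.nil_append]
      split_ifs with h1 <;>
        refine pvLoopA_congr rest ?_ ?_ ?_ ?_ <;>
          (try simp only [List.sum_cons, List.sum_nil, List.length_cons, List.length_nil] at *) <;>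
          (try push_cast) <;> omega
    | cons y r'' =>
      have hpos' : ∀ z ∈ y :: r'', 0 < z := fun z hz => hpos z (List.mem_cons_of_mem _ hz)
      have hsum : 0 < (y :: r'').sum := List.sum_pos _ hpos' (by simp)
      split_ifs with h1 <;>
        rw [ih (by simp) hpos' rest] <;>
          refine pvLoopA_congr rest ?_ ?_ ?_ ?_ <;>
            (try simp only [List.sum_cons, List.length_cons] at *) <;>
            (try push_cast) <;> first | (split_ifs <;> omega) | omega

-- head of dropWhile fails the predicate
lemma dropWhile_head_false {p : Int → Bool} {l : List Int} {y : Int} {ys : List Int}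
    (h : l.dropWhile p = y :: ys) : p y = false := by
  induction l with
  | nil => simp [List.dropWhile] at h
  | cons a as ih =>
    by_cases hp : p a
    · simp [List.dropWhile, hp] at h; exact ih h
    · simp [List.dropWhile, hp] at h; rw [← h.1]; simpa using hp

-- Main invariant: A's loop from a fresh-run state computes B's run-selection fold.
lemma pvMain : ∀ (n : ℕ) (l : List Int), l.length ≤ n → ∀ (mt mc : Int),
    pvLoopA l mt 0 0 mc =
      ((pvRunsB l).foldl
        (fun acc r => if r.sum > acc.1 then (r.sum, (r.length : Int)) else acc) (mt, mc)).2 := by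
  intro n
  induction n with
  | zero =>
    intro l hl mt mc
    have : l = [] := List.eq_nil_of_length_eq_zero (by omega)
    subst this; simp [pvLoopA, pvRunsB]
  | succ n ih =>
    intro l hl mt mc
    cases l with
    | nil => simp [pvLoopA, pvRunsB]
    | cons x xs =>
      by_cases hx : 0 < x
      · set p : Int → Bool := fun a => decide (0 < a) with hp
        have hsplit : x :: xs = (x :: xs.takeWhile p) ++ xs.dropWhile p := by
          simp [List.takeWhile_append_dropWhile]
        have hposrun : ∀ z ∈ x :: xs.takeWhile p, 0 < z := by
          intro z hz
          rcases List.mem_cons.1 hz with h | h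
          · omega
          · have := List.mem_takeWhile_imp h; simpa [hp] using this
        conv_lhs => rw [hsplit]
        rw [pvLoopA_run _ (by simp) hposrun, pvRunsB_cons_pos hx]
        simp only [List.foldl_cons]
        set r := x :: xs.takeWhile p with hr
        have hstep : ((if r.sum > (mt, mc).1 then (r.sum, (r.length : Int)) else (mt, mc)) : Int × Int)
            = (max mt (0 + r.sum), if 0 + r.sum > mt then 0 + (r.length : Int) else mc) := by
          split_ifs <;> simp <;> omega
        rw [hstep]
        have hdw : (xs.dropWhile p).length ≤ xs.length := List.length_dropWhile_le ..
        cases hrest : xs.dropWhile p with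
        | nil => simp [pvLoopA, pvRunsB]
        | cons y ys =>
          have hy : ¬ 0 < y := by
            have := dropWhile_head_false (p := p) hrest; simpa [hp] using this
          rw [pvLoopA_cons_neg (by omega), pvRunsB_cons_neg hy]
          refine .trans (pvLoopA_congr ys rfl rfl rfl rfl) (ih ys ?_ _ _)
          rw [hrest] at hdw; simp at hdw hl; omega
      · rw [pvLoopA_cons_neg (by omega), pvRunsB_cons_neg hx]
        exact ih xs (by simp at hl; omega) mt mc

-- ===== VERDICT (by name: the statement is the Claim_ definition above) =====
theorem so_luong_so_duong_lien_tiep_co_tong_lon_nhat_spec : Claim_equal_so_luong_so_duong_lien_tiep_co_tong_lon_nhat := by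
  intro l _
  show _ = _
  unfold so_luong_so_duong_lien_tiep_co_tong_lon_nhat so_luong_so_duong_lien_tiep_co_tong_lon_nhat_alt
  exact pvMain l.length l le_rfl 0 0
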